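-- pv_equiv track=rewrite | github.com/busycalibrating/AdversariaLLM | evaluate/distributional_paper/make_plots.py | generate_sample_sizes
-- ===== SOURCE A (Python) =====
-- def generate_sample_sizes(total_samples: int) -> tuple[int, ...]:
--     if total_samples < 1:
--         return tuple()
--     bases = (1, 2, 5)          # 1-2-5 pattern for each power of ten
--     result = []
--     power = 0
--     while True:
--         scale = 10 ** power
--         for b in bases:
--             value = b * scale
--             if value > total_samples:
--                 # Stop once the next milestone exceeds the target
--                 result.append(total_samples) if result[-1] != total_samples else None
--                 return tuple(result)
--             result.append(value)
--             if value == total_samples: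
--                 return tuple(result)
--         power += 1
-- ===== SOURCE B (Python) =====
-- def generate_sample_sizes(total_samples: int) -> tuple[int, ...]:
--     # Staged construction: find the top power of ten by dividing the input down,
--     # build all full decades directly, then settle the top decade and the tail fix-up.
--     if total_samples < 1:
--         return tuple()
--     d, t = 0, total_samples
--     while t >= 10:
--         t //= 10
--         d += 1
--     top = 10 ** d
--     ms = [b * 10 ** p for p in range(d) for b in (1, 2, 5)]
--     ms.append(top)
--     if 2 * top <= total_samples:
--         ms.append(2 * top)
--     if 5 * top <= total_samples:
--         ms.append(5 * top)
--     if ms[-1] != total_samples: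
--         ms.append(total_samples)
--     return tuple(ms)
-- ===== Notes on version B (the rewrite author's own statement) =====
-- stated objective: alternative
-- what changed: Instead of A's upward generate-and-test loop with four interleaved early returns, B first divides the input down to find the top power of ten, then constructs all full 1-2-5 decades directly by comprehension, then settles the top decade with two comparisons and one tail fix-up.
import Mathlib
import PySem

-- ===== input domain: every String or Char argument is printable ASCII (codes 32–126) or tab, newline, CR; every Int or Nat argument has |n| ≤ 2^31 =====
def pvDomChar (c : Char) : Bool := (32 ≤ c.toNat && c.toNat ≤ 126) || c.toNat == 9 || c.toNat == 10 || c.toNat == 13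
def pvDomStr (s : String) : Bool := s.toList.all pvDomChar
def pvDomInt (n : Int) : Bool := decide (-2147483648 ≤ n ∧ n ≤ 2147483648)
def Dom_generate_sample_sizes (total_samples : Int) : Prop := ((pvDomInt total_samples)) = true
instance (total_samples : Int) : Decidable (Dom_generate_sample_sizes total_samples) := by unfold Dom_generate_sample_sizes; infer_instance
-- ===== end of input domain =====

-- B replaces A's upward generate-and-test loop (interleaved early returns) by staged construction:
-- find the top power of ten by dividing the input down, build full decades by comprehension,
-- then settle the top decade and the tail fix-up (objective: alternative).

-- ===== PORT A =====
-- tail fix-up `result.append(total) if result[-1] != total else None`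
-- (result[-1] via pyGet?; the empty-list IndexError is unreachable since total ≥ 1 puts 1 in the list first)
def pvFixA (total : Int) (r : List Int) : List Int :=
  if PySem.List.pyGet? r (-1) ≠ some total then r ++ [total] else r

-- A's `while True` over powers of ten, the inner `for b in (1,2,5)` unrolled; fuel only makes the
-- recursion total (total < 10^fuel guarantees it is never exhausted)
def pvLoopA (total : Int) (result : List Int) (power : Nat) (fuel : Nat) : List Int :=
  match fuel with
  | 0 => result
  | fuel + 1 =>
    let scale : Int := 10 ^ power
    let v1 := 1 * scale
    if v1 > total then pvFixA total result
    else
      let r1 := result ++ [v1]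
      if v1 = total then r1
      else
        let v2 := 2 * scale
        if v2 > total then pvFixA total r1
        else
          let r2 := r1 ++ [v2]
          if v2 = total then r2
          else
            let v3 := 5 * scale
            if v3 > total then pvFixA total r2
            else
              let r3 := r2 ++ [v3]
              if v3 = total then r3
              else pvLoopA total r3 (power + 1) fuel

def generate_sample_sizes (total_samples : Int) : List Int :=
  if total_samples < 1 then []
  else pvLoopA total_samples [] 0 (total_samples.natAbs + 2)

-- ===== PORT B =====
-- B's `while t >= 10: t //= 10; d += 1` (fuel only for totality; t.natAbs is ample)
def pvDigits (t : Int) (d : Nat) (fuel : Nat) : Nat :=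
  match fuel with
  | 0 => d
  | fuel + 1 => if t ≥ 10 then pvDigits (PySem.Int.floordiv t 10) (d + 1) fuel else d

-- the staged construction after the digit loop: comprehension, top decade, tail fix-up
def pvStages (t : Int) (d : Nat) : List Int :=
  let top : Int := 10 ^ d
  -- [b * 10 ** p for p in range(d) for b in (1, 2, 5)], then ms.append(top)
  let ms := (List.range d).flatMap (fun p => [(1 : Int), 2, 5].map (fun b => b * 10 ^ p)) ++ [top]
  let ms := if 2 * top ≤ t then ms ++ [2 * top] else ms
  let ms := if 5 * top ≤ t then ms ++ [5 * top] else ms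
  -- `if ms[-1] != total_samples: ms.append(total_samples)`
  if PySem.List.pyGet? ms (-1) ≠ some t then ms ++ [t] else ms

def generate_sample_sizes_alt (total_samples : Int) : List Int :=
  if total_samples < 1 then []
  else pvStages total_samples (pvDigits total_samples 0 total_samples.natAbs)

-- ===== PRECONDITION & SPEC =====
def Spec_generate_sample_sizes (total_samples : Int) (out : List Int) : Prop := out = generate_sample_sizes_alt total_samples
instance (total_samples : Int) (out : List Int) : Decidable (Spec_generate_sample_sizes total_samples out) := by unfold Spec_generate_sample_sizes; infer_instance

-- ===== CLAIM (what is proved, stated in full; the proofs are below) =====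
def Claim_equal_generate_sample_sizes : Prop := ∀ (total_samples : Int), Dom_generate_sample_sizes total_samples → Spec_generate_sample_sizes total_samples (generate_sample_sizes total_samples)

-- ===== LEMMAS AND PROOFS =====

-- the milestones of the decade containing t (10^p ≤ t < 10^(p+1)), tail fix-up included
def pvTop (t : Int) (p : Nat) : List Int :=
  [10 ^ p] ++ (if 2 * 10 ^ p ≤ t then [2 * 10 ^ p] else [])
    ++ (if 5 * 10 ^ p ≤ t then [5 * 10 ^ p] else [])
    ++ (if t = 10 ^ p ∨ t = 2 * 10 ^ p ∨ t = 5 * 10 ^ p then [] else [t])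

-- the whole suffix of the answer from decade p on
def pvTail (t : Int) (p : Nat) (f : Nat) : List Int :=
  match f with
  | 0 => pvTop t p
  | f + 1 => if t < 10 ^ (p + 1) then pvTop t p
             else [10 ^ p, 2 * 10 ^ p, 5 * 10 ^ p] ++ pvTail t (p + 1) f

lemma pvFixA_append (t a : Int) (r : List Int) :
    pvFixA t (r ++ [a]) = r ++ [a] ++ (if a = t then [] else [t]) := by
  by_cases h : a = t <;>
    simp [pvFixA, PySem.List.pyGet?_neg_one_append_singleton, h]

lemma pvLoopA_step (total : Int) (r : List Int) (p f : Nat) :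
    pvLoopA total r p (f + 1) =
      (if (1 : Int) * 10 ^ p > total then pvFixA total r
       else if (1 : Int) * 10 ^ p = total then r ++ [1 * 10 ^ p]
       else if (2 : Int) * 10 ^ p > total then pvFixA total (r ++ [1 * 10 ^ p])
       else if (2 : Int) * 10 ^ p = total then r ++ [1 * 10 ^ p] ++ [2 * 10 ^ p]
       else if (5 : Int) * 10 ^ p > total then pvFixA total (r ++ [1 * 10 ^ p] ++ [2 * 10 ^ p])
       else if (5 : Int) * 10 ^ p = total then r ++ [1 * 10 ^ p] ++ [2 * 10 ^ p] ++ [5 * 10 ^ p]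
       else pvLoopA total (r ++ [1 * 10 ^ p] ++ [2 * 10 ^ p] ++ [5 * 10 ^ p]) (p + 1) f) := rfl

-- within one decade (10^p ≤ t < 10^(p+1)) the loop body, fix-up included, yields pvTop
lemma pvLoopA_top (t : Int) (p : Nat) (f : Nat) (r : List Int)
    (h1 : 10 ^ p ≤ t) (h2 : t < 10 ^ (p + 1)) :
    pvLoopA t r p (f + 2) = r ++ pvTop t p := by
  have hp : (0 : Int) < 10 ^ p := by positivity
  have hps : (10 : Int) ^ (p + 1) = 10 ^ p * 10 := pow_succ 10 p
  rw [show f + 2 = (f + 1) + 1 by omega, pvLoopA_step, if_neg (by omega)]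
  by_cases c2 : (2 : Int) * 10 ^ p ≤ t
  · rw [if_neg (by omega), if_neg (by omega)]
    by_cases c5 : (5 : Int) * 10 ^ p ≤ t
    · rw [if_neg (by omega), if_neg (by omega)]
      by_cases q3 : (5 : Int) * 10 ^ p = t
      · rw [if_pos q3]
        unfold pvTop
        rw [if_pos c2, if_pos c5, if_pos (by omega)]
        simp
      · rw [if_neg q3, pvLoopA_step, if_pos (by rw [hps]; omega), pvFixA_append,
            if_neg (by omega)]
        unfold pvTop
        rw [if_pos c2, if_pos c5, if_neg (by omega)]
        simp
    · by_cases q2 : (2 : Int) * 10 ^ p = t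
      · rw [if_pos q2]
        unfold pvTop
        rw [if_pos c2, if_neg c5, if_pos (by omega)]
        simp
      · rw [if_neg q2, if_pos (by omega), pvFixA_append, if_neg (by omega)]
        unfold pvTop
        rw [if_pos c2, if_neg c5, if_neg (by omega)]
        simp
  · by_cases q1 : (1 : Int) * 10 ^ p = t
    · rw [if_pos q1]
      unfold pvTop
      rw [if_neg c2, if_neg (by omega), if_pos (by omega)]
      simp
    · rw [if_neg q1, if_pos (by omega), pvFixA_append, if_neg (by omega)]
      unfold pvTop
      rw [if_neg c2, if_neg (by omega), if_neg (by omega)]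
      simp

lemma pv_lt_pow (n : Nat) : (n : Int) < 10 ^ n := by
  have : n < 10 ^ n := Nat.lt_pow_self (by norm_num)
  exact_mod_cast this

lemma pv_pow_mono {a b : Nat} (h : a ≤ b) : (10 : Int) ^ a ≤ 10 ^ b :=
  pow_le_pow_right₀ (by norm_num) h

-- the whole of A's loop is the decade decomposition
lemma pvLoopA_tail (t : Int) : ∀ (f p : Nat) (r : List Int),
    10 ^ p ≤ t → t < 10 ^ (p + 1 + f) → pvLoopA t r p (f + 2) = r ++ pvTail t p f := by
  intro f
  induction f with
  | zero => intro p r h1 h2; exact pvLoopA_top t p 0 r h1 h2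
  | succ f ih =>
    intro p r h1 h2
    by_cases hlt : t < 10 ^ (p + 1)
    · rw [show f + 1 + 2 = (f + 1) + 2 by rfl, pvLoopA_top t p (f + 1) r h1 hlt]
      simp [pvTail, hlt]
    · have hge : 10 ^ (p + 1) ≤ t := by omega
      have hp : (0 : Int) < 10 ^ p := by positivity
      have hps : (10 : Int) ^ (p + 1) = 10 ^ p * 10 := pow_succ 10 p
      rw [show f + 1 + 2 = (f + 2) + 1 by omega, pvLoopA_step,
          if_neg (by omega), if_neg (by omega), if_neg (by omega), if_neg (by omega),
          if_neg (by omega), if_neg (by omega),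
          ih (p + 1) _ hge (by rw [show p + 1 + 1 + f = p + 1 + (f + 1) by omega]; exact h2)]
      simp [pvTail, hlt]

lemma pvDigits_shift (f : Nat) : ∀ (t : Int) (d : Nat),
    pvDigits t d f = d + pvDigits t 0 f := by
  induction f with
  | zero => intro t d; show d = d + 0; omega
  | succ f ih =>
    intro t d
    show (if t ≥ 10 then pvDigits (PySem.Int.floordiv t 10) (d + 1) f else d)
        = d + (if t ≥ 10 then pvDigits (PySem.Int.floordiv t 10) (0 + 1) f else 0)
    by_cases h : t ≥ 10
    · rw [if_pos h, if_pos h, ih, ih (PySem.Int.floordiv t 10) 1]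
      omega
    · rw [if_neg h, if_neg h]
      omega

lemma pvDigits_correct : ∀ (f : Nat) (t : Int), 1 ≤ t → t < 10 ^ f →
    10 ^ (pvDigits t 0 f) ≤ t ∧ t < 10 ^ (pvDigits t 0 f + 1) := by
  intro f
  induction f with
  | zero => intro t h1 h2; simp at h2; omega
  | succ f ih =>
    intro t h1 h2
    by_cases h : t ≥ 10
    · have hq : PySem.Int.floordiv t 10 = t / 10 :=
        PySem.Int.floordiv_eq_ediv_of_pos (by norm_num)
      have hqb : 10 * (t / 10) ≤ t ∧ t < 10 * (t / 10) + 10 := by omega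
      have hq1 : 1 ≤ t / 10 := by omega
      have hq2 : t / 10 < 10 ^ f := by
        have hps : (10 : Int) ^ (f + 1) = 10 ^ f * 10 := pow_succ 10 f
        omega
      obtain ⟨ha, hb⟩ := ih (t / 10) hq1 hq2
      have hstep : pvDigits t 0 (f + 1) = 1 + pvDigits (t / 10) 0 f := by
        rw [show pvDigits t 0 (f + 1)
              = if t ≥ 10 then pvDigits (PySem.Int.floordiv t 10) (0 + 1) f else 0 from rfl,
            if_pos h, hq, pvDigits_shift]
      rw [hstep]
      constructor
      · calc (10 : Int) ^ (1 + pvDigits (t / 10) 0 f)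
            = 10 * 10 ^ (pvDigits (t / 10) 0 f) := by rw [pow_add]; ring
          _ ≤ 10 * (t / 10) := by linarith
          _ ≤ t := hqb.1
      · calc t < 10 * (t / 10) + 10 := hqb.2
          _ ≤ 10 * 10 ^ (pvDigits (t / 10) 0 f + 1) := by
              have : t / 10 + 1 ≤ 10 ^ (pvDigits (t / 10) 0 f + 1) := by omega
              linarith
          _ = 10 ^ (1 + pvDigits (t / 10) 0 f + 1) := by rw [pow_add]; ring
    · have hd : pvDigits t 0 (f + 1) = 0 := by
        rw [show pvDigits t 0 (f + 1)
              = if t ≥ 10 then pvDigits (PySem.Int.floordiv t 10) (0 + 1) f else 0 from rfl,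
            if_neg h]
      rw [hd]
      constructor
      · simpa using h1
      · simpa using (by omega : t < 10)

-- the decade decomposition is B's comprehension plus the top decade
lemma pvTail_flatMap (t : Int) : ∀ (f p d : Nat), p ≤ d → d ≤ p + f →
    10 ^ d ≤ t → t < 10 ^ (d + 1) →
    pvTail t p f =
      ((List.range (d - p)).flatMap (fun i => [(1 : Int), 2, 5].map (fun b => b * 10 ^ (p + i))))
        ++ pvTop t d := by
  intro f
  induction f with
  | zero =>
    intro p d hpd hdp h1 h2
    have : d = p := by omega
    subst this
    simp [pvTail]
  | succ f ih =>
    intro p d hpd hdp h1 h2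
    by_cases hlt : t < 10 ^ (p + 1)
    · have hdp' : d ≤ p := by
        by_contra hc
        have : (10 : Int) ^ (p + 1) ≤ 10 ^ d := pv_pow_mono (by omega)
        omega
      have : d = p := by omega
      subst this
      simp [pvTail, hlt]
    · have hge : 10 ^ (p + 1) ≤ t := by omega
      have hpd' : p + 1 ≤ d := by
        by_contra hc
        have : (10 : Int) ^ (d + 1) ≤ 10 ^ (p + 1) := pv_pow_mono (by omega)
        omega
      have hrec := ih (p + 1) d hpd' (by omega) h1 h2
      have hsub : d - p = (d - (p + 1)) + 1 := by omega
      rw [pvTail, if_neg hlt, hrec, hsub, List.range_succ_eq_map]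
      rw [List.flatMap_cons, List.flatMap_map]
      have harith : (fun a => List.map (fun b => b * 10 ^ (p + a.succ)) [(1 : Int), 2, 5])
          = (fun a => List.map (fun b => b * 10 ^ (p + 1 + a)) [(1 : Int), 2, 5]) := by
        funext a
        rw [show p + a.succ = p + 1 + a by omega]
      rw [harith]
      simp only [Nat.add_zero, List.map_cons, List.map_nil, one_mul,
        List.cons_append, List.nil_append]
-- the staged construction, under the decade bounds, is the comprehension plus pvTop
lemma pvStages_eq (t : Int) (d : Nat) (_h1 : 10 ^ d ≤ t) (h2 : t < 10 ^ (d + 1)) :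
    pvStages t d =
      ((List.range d).flatMap (fun p => [(1 : Int), 2, 5].map (fun b => b * 10 ^ p)))
        ++ pvTop t d := by
  have hp : (0 : Int) < 10 ^ d := by positivity
  have hps : (10 : Int) ^ (d + 1) = 10 ^ d * 10 := pow_succ 10 d
  unfold pvStages pvTop
  simp only []
  by_cases c5 : 5 * 10 ^ d ≤ t
  · have c2 : 2 * 10 ^ d ≤ t := by omega
    rw [if_pos c2, if_pos c5, if_pos c2, if_pos c5]
    by_cases q : t = 5 * 10 ^ d
    · rw [if_neg (by rw [PySem.List.pyGet?_neg_one_append_singleton]; simp [q]),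
          if_pos (by omega)]
      simp
    · rw [if_pos (by rw [PySem.List.pyGet?_neg_one_append_singleton]; simp; omega),
          if_neg (by omega)]
      simp
  · rw [if_neg c5, if_neg c5]
    by_cases c2 : 2 * 10 ^ d ≤ t
    · rw [if_pos c2, if_pos c2]
      by_cases q : t = 2 * 10 ^ d
      · rw [if_neg (by rw [PySem.List.pyGet?_neg_one_append_singleton]; simp [q]),
            if_pos (by omega)]
        simp
      · rw [if_pos (by rw [PySem.List.pyGet?_neg_one_append_singleton]; simp; omega),
            if_neg (by omega)]
        simp
    · rw [if_neg c2, if_neg c2]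
      by_cases q : t = 10 ^ d
      · rw [if_neg (by rw [PySem.List.pyGet?_neg_one_append_singleton]; simp [q]),
            if_pos (by omega)]
        simp
      · rw [if_pos (by rw [PySem.List.pyGet?_neg_one_append_singleton]; simp; omega),
            if_neg (by omega)]
        simp

-- ===== VERDICT (by name: the statement is the Claim_ definition above) =====
theorem generate_sample_sizes_spec : Claim_equal_generate_sample_sizes := by
  intro t _
  unfold Spec_generate_sample_sizes generate_sample_sizes generate_sample_sizes_alt
  by_cases h : t < 1
  · rw [if_pos h, if_pos h]
  · have h1 : 1 ≤ t := by omega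
    have habs : (t.natAbs : Int) = t := by omega
    have hlt : t < 10 ^ t.natAbs := by rw [← habs]; exact pv_lt_pow t.natAbs
    obtain ⟨hd1, hd2⟩ := pvDigits_correct t.natAbs t h1 hlt
    have hdle : pvDigits t 0 t.natAbs ≤ 0 + t.natAbs := by
      by_contra hc
      have h10 : (10 : Int) ^ t.natAbs ≤ 10 ^ (pvDigits t 0 t.natAbs) := pv_pow_mono (by omega)
      omega
    rw [if_neg h, if_neg h,
        pvLoopA_tail t t.natAbs 0 [] (by simpa using h1)
          (by
            calc t < 10 ^ t.natAbs := hlt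
              _ ≤ 10 ^ (0 + 1 + t.natAbs) := pv_pow_mono (by omega)),
        List.nil_append,
        pvTail_flatMap t t.natAbs 0 (pvDigits t 0 t.natAbs) (Nat.zero_le _) hdle hd1 hd2,
        pvStages_eq t (pvDigits t 0 t.natAbs) hd1 hd2]
    simp
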